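-- pv_equiv track=rewrite | github.com/Teri1111/omgv2o1 | KBQA-o1-main/utils/components/utils.py | extract_mentioned_entities_from_sexpr
-- ===== SOURCE A (Python) =====
-- from typing import List
--
-- def extract_mentioned_entities_from_sexpr(expr:str) -> List[str]:
--     expr = expr.replace('(', ' ( ')
--     expr = expr.replace(')', ' ) ')
--     toks = expr.split(' ')
--     toks = [x for x in toks if len(x)]
--     entitiy_tokens = []
--     for t in toks:
--         # normalize entity
--         if t.startswith('m.') or t.startswith('g.'):
--             entitiy_tokens.append(t)
--     return entitiy_tokens
-- ===== SOURCE B (Python) =====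
-- def extract_mentioned_entities_from_sexpr(expr):
--     # single pass over the characters: tokens are maximal runs of chars other
--     # than ' ', '(' and ')'; collect a token iff it starts with 'm.' or 'g.'
--     out = []
--     cur = []
--     for ch in expr + ' ':
--         if ch == ' ' or ch == '(' or ch == ')':
--             if len(cur) >= 2 and cur[0] in 'mg' and cur[1] == '.':
--                 out.append(''.join(cur))
--             cur = []
--         else:
--             cur.append(ch)
--     return out
-- ===== Notes on version B (the rewrite author's own statement) =====
-- stated objective: simpler
-- what changed: Replaces A's pad-parentheses / split-on-space / drop-empties / append-loop pipeline with a single character scan that cuts tokens at space and parenthesis delimiters and collects entity-prefixed tokens directly, building no intermediate strings or token lists.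
import Mathlib
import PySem

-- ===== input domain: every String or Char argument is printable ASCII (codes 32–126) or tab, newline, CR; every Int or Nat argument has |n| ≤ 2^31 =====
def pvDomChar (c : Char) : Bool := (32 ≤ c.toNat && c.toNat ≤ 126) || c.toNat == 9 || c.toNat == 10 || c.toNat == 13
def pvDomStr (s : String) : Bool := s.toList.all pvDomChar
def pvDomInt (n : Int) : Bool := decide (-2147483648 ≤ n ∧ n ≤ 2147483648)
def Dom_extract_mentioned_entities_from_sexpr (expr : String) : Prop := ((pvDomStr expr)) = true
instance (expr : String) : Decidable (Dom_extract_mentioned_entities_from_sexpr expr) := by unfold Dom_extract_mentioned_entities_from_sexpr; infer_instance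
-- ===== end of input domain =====

-- B replaces A's pad-parens / split(' ') / filter-empties / append-loop pipeline
-- by a single character scan that cuts tokens at ' ', '(' and ')' and keeps those
-- starting with 'm.' or 'g.' (objective: simpler; one pass, no intermediate strings).


-- ===== PORT A =====
-- replace '(' by ' ( ', replace ')' by ' ) ', split on ' ', drop empties,
-- then the append loop collecting tokens starting with 'm.' or 'g.'
def extract_mentioned_entities_from_sexpr (expr : String) : List String :=
  ((((PySem.Str.split? (PySem.Str.replace (PySem.Str.replace expr "(" " ( ") ")" " ) ") " ").getD
      []).filter (fun x => PySem.Str.len x != 0)).foldl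
    (fun acc t =>
      if PySem.Str.startswith t "m." || PySem.Str.startswith t "g." then acc ++ [t] else acc) [])

-- ===== PORT B =====
-- len(cur) >= 2 and cur[0] in 'mg' and cur[1] == '.'
def pvIsTok (cur : List Char) : Bool :=
  match cur with
  | a :: b :: _ => (a == 'm' || a == 'g') && b == '.'
  | _ => false

-- the loop body of B: flush the current token at a delimiter, else extend it
def pvStep (st : List String × List Char) (ch : Char) : List String × List Char :=
  if ch == ' ' || ch == '(' || ch == ')' then
    (if pvIsTok st.2 then st.1 ++ [String.ofList st.2] else st.1, [])
  else (st.1, st.2 ++ [ch])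

def extract_mentioned_entities_from_sexpr_alt (expr : String) : List String :=
  ((expr.toList ++ [' ']).foldl pvStep ([], [])).1

-- ===== PRECONDITION & SPEC =====
def Spec_extract_mentioned_entities_from_sexpr (expr : String) (out : List String) : Prop := out = extract_mentioned_entities_from_sexpr_alt expr
instance (expr : String) (out : List String) : Decidable (Spec_extract_mentioned_entities_from_sexpr expr out) := by unfold Spec_extract_mentioned_entities_from_sexpr; infer_instance

-- ===== CLAIM (what is proved, stated in full; the proofs are below) =====
def Claim_equal_extract_mentioned_entities_from_sexpr : Prop := ∀ (expr : String), Dom_extract_mentioned_entities_from_sexpr expr → Spec_extract_mentioned_entities_from_sexpr expr (extract_mentioned_entities_from_sexpr expr)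

-- ===== LEMMAS AND PROOFS =====

-- what A's two replace calls do to one character
def pvPad (c : Char) : List Char :=
  if c = '(' then [' ', '(', ' '] else if c = ')' then [' ', ')', ' '] else [c]

-- reference split-on-space (rcur = current chunk, reversed)
def pvSplit : List Char → List Char → List (List Char)
  | [], rcur => [rcur.reverse]
  | c :: t, rcur => if c = ' ' then rcur.reverse :: pvSplit t [] else pvSplit t (c :: rcur)

theorem pv_replace_go_single (a : Char) (new : List Char) :
    ∀ (fuel : Nat) (l acc : List Char), l.length ≤ fuel →
    PySem.Chars.replace.go [a] new fuel l acc
      = acc.reverse ++ l.flatMap (fun c => if c = a then new else [c]) := by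
  intro fuel
  induction fuel with
  | zero =>
    intro l acc h
    have : l = [] := List.eq_nil_of_length_eq_zero (Nat.le_zero.mp h)
    subst this; simp [PySem.Chars.replace.go]
  | succ n ih =>
    intro l acc h
    cases l with
    | nil => simp [PySem.Chars.replace.go]
    | cons c t =>
      rw [PySem.Chars.replace.go]
      by_cases hc : c = a
      · simp [List.isPrefixOf, hc, ih t _ (by simpa using h)]
      · simp [List.isPrefixOf, hc, Ne.symm hc, ih t _ (by simpa using h), beq_iff_eq]

theorem pv_replace_single (a : Char) (new s : List Char) :
    PySem.Chars.replace s [a] new = s.flatMap (fun c => if c = a then new else [c]) := by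
  simp [PySem.Chars.replace, pv_replace_go_single a new s.length s [] le_rfl]

theorem pv_pad_eq (s : List Char) :
    PySem.Chars.replace (PySem.Chars.replace s ['('] [' ', '(', ' ']) [')'] [' ', ')', ' ']
      = s.flatMap pvPad := by
  rw [pv_replace_single, pv_replace_single, List.flatMap_assoc]
  apply List.flatMap_congr
  intro c _
  by_cases h1 : c = '(' <;> by_cases h2 : c = ')' <;> simp_all [pvPad]

theorem pv_split_go :
    ∀ (fuel : Nat) (l rcur : List Char) (acc : List (List Char)), l.length + 1 ≤ fuel →
    PySem.Chars.splitOn.go [' '] fuel l rcur acc = acc.reverse ++ pvSplit l rcur := by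
  intro fuel
  induction fuel with
  | zero => intro l rcur acc h; omega
  | succ n ih =>
    intro l rcur acc h
    cases l with
    | nil => simp [PySem.Chars.splitOn.go, pvSplit]
    | cons c t =>
      rw [PySem.Chars.splitOn.go]
      by_cases hc : c = ' '
      · simp [List.isPrefixOf, hc, ih t _ _ (by simpa using h), pvSplit]
      · simp [List.isPrefixOf, hc, Ne.symm hc, ih t _ _ (by simpa using h), pvSplit, beq_iff_eq]

theorem pv_splitOn_eq (s : List Char) : PySem.Chars.splitOn s [' '] = pvSplit s [] := by
  simp [PySem.Chars.splitOn, pv_split_go (s.length + 1) s [] [] le_rfl]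

-- A's two string predicates collapse into pvIsTok on the raw chunk
theorem pv_isTok_eq (cs : List Char) :
    (PySem.Chars.startswith cs ['m', '.'] || PySem.Chars.startswith cs ['g', '.']) = pvIsTok cs := by
  match cs with
  | [] => rfl
  | [a] => simp [PySem.Chars.startswith, List.isPrefixOf, pvIsTok]
  | a :: b :: t =>
    simp [PySem.Chars.startswith, List.isPrefixOf, pvIsTok, Bool.and_or_distrib_right, BEq.comm]

theorem pvA_eq (expr : String) :
    extract_mentioned_entities_from_sexpr expr
      = ((pvSplit (expr.toList.flatMap pvPad) []).filter pvIsTok).map String.ofList := by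
  unfold extract_mentioned_entities_from_sexpr
  have h2 : (PySem.Str.replace (PySem.Str.replace expr "(" " ( ") ")" " ) ").toList
      = expr.toList.flatMap pvPad := by
    simp only [PySem.Str.toList_replace]
    have ho : "(".toList = ['('] := rfl
    have hn : " ( ".toList = [' ', '(', ' '] := rfl
    have ho2 : ")".toList = [')'] := rfl
    have hn2 : " ) ".toList = [' ', ')', ' '] := rfl
    rw [ho, hn, ho2, hn2, pv_pad_eq]
  have hsplit : PySem.Str.split? (PySem.Str.replace (PySem.Str.replace expr "(" " ( ") ")" " ) ") " "
      = some ((pvSplit (expr.toList.flatMap pvPad) []).map String.ofList) := by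
    simp [PySem.Str.split?, PySem.Chars.split?, h2, pv_splitOn_eq, List.isEmpty]
  rw [hsplit, Option.getD_some]
  have hfold := fun (l : List String) => PySem.List.foldl_append_if
      (fun t => PySem.Str.startswith t "m." || PySem.Str.startswith t "g.") id l []
  simp only [id] at hfold
  rw [hfold]
  simp only [List.map_id, List.nil_append]
  rw [@List.filter_map (List Char) String String.ofList (fun x => PySem.Str.len x != 0)
        (pvSplit (expr.toList.flatMap pvPad) [])]
  rw [@List.filter_map (List Char) String String.ofList
        (fun t => PySem.Str.startswith t "m." || PySem.Str.startswith t "g.")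
        (List.filter ((fun x => PySem.Str.len x != 0) ∘ String.ofList)
          (pvSplit (expr.toList.flatMap pvPad) []))]
  rw [@List.filter_filter (List Char)
        ((fun t => PySem.Str.startswith t "m." || PySem.Str.startswith t "g.") ∘ String.ofList)
        ((fun x => PySem.Str.len x != 0) ∘ String.ofList)
        (pvSplit (expr.toList.flatMap pvPad) [])]
  refine congrArg (List.map String.ofList) ?_
  apply List.filter_congr
  intro cs _
  simp only [Function.comp]
  rw [show ∀ x, PySem.Str.startswith x "m." = PySem.Chars.startswith x.toList ['m','.'] from
        fun x => by simp [PySem.Str.startswith_eq],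
      show ∀ x, PySem.Str.startswith x "g." = PySem.Chars.startswith x.toList ['g','.'] from
        fun x => by simp [PySem.Str.startswith_eq]]
  rw [String.toList_ofList, pv_isTok_eq]
  cases h : pvIsTok cs with
  | false => simp
  | true =>
    match cs, h with
    | a :: b :: t, _ => simp [PySem.Str.len_eq]; omega

theorem pvB_go (l : List Char) : ∀ (out : List String) (cur : List Char),
    ((l ++ [' ']).foldl pvStep (out, cur)).1
      = out ++ ((pvSplit (l.flatMap pvPad) cur.reverse).filter pvIsTok).map String.ofList := by
  induction l with
  | nil =>
    intro out cur
    simp only [List.nil_append, List.foldl_cons, List.foldl_nil, List.flatMap_nil]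
    simp [pvStep, pvSplit]
    cases h : pvIsTok cur <;> simp [h]
  | cons c t ih =>
    intro out cur
    simp only [List.cons_append, List.foldl_cons, List.flatMap_cons]
    by_cases hsp : c = ' '
    · subst hsp
      rw [show pvStep (out, cur) ' ' = (if pvIsTok cur then out ++ [String.ofList cur] else out, []) from rfl]
      rw [ih]
      simp [pvPad, pvSplit]
      cases h : pvIsTok cur <;> simp [h]
    · by_cases hop : c = '('
      · subst hop
        rw [show pvStep (out, cur) '(' = (if pvIsTok cur then out ++ [String.ofList cur] else out, []) from rfl]
        rw [ih]
        simp [pvPad, pvSplit, List.filter_cons, show pvIsTok ['('] = false from rfl]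
        cases pvIsTok cur <;> simp
      · by_cases hcp : c = ')'
        · subst hcp
          rw [show pvStep (out, cur) ')' = (if pvIsTok cur then out ++ [String.ofList cur] else out, []) from rfl]
          rw [ih]
          simp [pvPad, pvSplit, List.filter_cons, show pvIsTok [')'] = false from rfl]
          cases pvIsTok cur <;> simp
        · have hstep : pvStep (out, cur) c = (out, cur ++ [c]) := by
            simp [pvStep, hsp, hop, hcp]
          rw [hstep, ih]
          simp [pvPad, hsp, hop, hcp, pvSplit]

-- ===== VERDICT (by name: the statement is the Claim_ definition above) =====
theorem extract_mentioned_entities_from_sexpr_spec : Claim_equal_extract_mentioned_entities_from_sexpr := by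
  intro expr _
  unfold Spec_extract_mentioned_entities_from_sexpr
  rw [pvA_eq]
  have h := pvB_go expr.toList [] []
  simpa [extract_mentioned_entities_from_sexpr_alt] using h.symm
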